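-- pv_equiv track=rewrite | github.com/sekharnarayanaswamy-del/jaimineeyasamavedam | src/render_pdf.py | replace_accents
-- ===== SOURCE A (Python) =====
-- def replace_accents(text):
--     r"""
--     Replaces ASCII markers (1), (2), etc., with raised accent marks.
--
--     Uses \makebox[0pt] to create zero-width accent overlays that don't
--     add horizontal spacing. The accents are raised using \raisebox and
--     made bold/larger using \accentmark.
--
--     Unicode Vedic Accent Characters:
--     - U+0951 = ॑ (Swarita - vertical line above)
--     - U+1CD2 = ᳒ (Anudatta - horizontal line below)
--     - U+1CF8 = ᳸ (Kampa - curved mark)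
--     - U+1CF9 = ᳹ (Trikampa - double curve)
--     """
--     if not text: return text
--
--     replacements = [
--         # Swarita (Vertical line above) - all accents at same level
--         ('(1)', r'\makebox[0pt][l]{\raisebox{0.6ex}{\accentmark{12}{\char"0951}}}'),
--
--         # Anudatta (Horizontal line below) - same level
--         ('(2)', r'\makebox[0pt][l]{\raisebox{0.6ex}{\accentmark{15}{\char"1CD2}}}'),
--
--         # Kampa (Curve) - same level
--         ('(3)', r'\makebox[0pt][l]{\raisebox{0.6ex}{\accentmark{12}{\char"1CF8}}}'),
--
--         # Trikampa - same level
--         ('(4)', r'\makebox[0pt][l]{\raisebox{0.6ex}{\accentmark{12}{\char"1CF9}}}'),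
--     ]
--
--     for marker, replacement in replacements:
--         text = text.replace(marker, replacement)
--
--     return text
-- ===== SOURCE B (Python) =====
-- def replace_accents(text):
--     """Single left-to-right scan: look up each 3-char window in a marker table
--     instead of running four sequential str.replace passes."""
--     if not text:
--         return text
--     mapping = {
--         '(1)': r'\makebox[0pt][l]{\raisebox{0.6ex}{\accentmark{12}{\char"0951}}}',
--         '(2)': r'\makebox[0pt][l]{\raisebox{0.6ex}{\accentmark{15}{\char"1CD2}}}',
--         '(3)': r'\makebox[0pt][l]{\raisebox{0.6ex}{\accentmark{12}{\char"1CF8}}}',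
--         '(4)': r'\makebox[0pt][l]{\raisebox{0.6ex}{\accentmark{12}{\char"1CF9}}}',
--     }
--     out = []
--     i = 0
--     n = len(text)
--     while i < n:
--         repl = mapping.get(text[i:i+3])
--         if repl is not None:
--             out.append(repl)
--             i += 3
--         else:
--             out.append(text[i])
--             i += 1
--     return ''.join(out)
-- ===== Notes on version B (the rewrite author's own statement) =====
-- stated objective: alternative
-- what changed: Replaced four sequential full-string str.replace passes by a single left-to-right scan that looks up each 3-character window in a marker-to-macro dict and emits either the macro (skipping 3 chars) or the current char; since no replacement contains a marker, one pass gives the same result.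
import Mathlib
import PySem

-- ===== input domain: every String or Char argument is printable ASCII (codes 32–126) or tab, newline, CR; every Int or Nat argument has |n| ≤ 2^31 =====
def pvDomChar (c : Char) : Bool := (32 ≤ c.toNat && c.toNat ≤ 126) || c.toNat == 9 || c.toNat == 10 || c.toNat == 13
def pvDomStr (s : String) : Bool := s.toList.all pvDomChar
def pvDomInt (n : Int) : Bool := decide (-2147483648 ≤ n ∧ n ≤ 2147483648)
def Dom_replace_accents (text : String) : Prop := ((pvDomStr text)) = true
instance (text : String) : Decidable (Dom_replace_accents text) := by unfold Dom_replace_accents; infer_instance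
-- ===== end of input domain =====

-- B replaces A's four sequential str.replace passes by one left-to-right scan with a
-- 3-char-window table lookup (alternative decomposition, same result).
-- ===== PORT A =====
def accentM1 : String := "\\makebox[0pt][l]{\\raisebox{0.6ex}{\\accentmark{12}{\\char\"0951}}}"
def accentM2 : String := "\\makebox[0pt][l]{\\raisebox{0.6ex}{\\accentmark{15}{\\char\"1CD2}}}"
def accentM3 : String := "\\makebox[0pt][l]{\\raisebox{0.6ex}{\\accentmark{12}{\\char\"1CF8}}}"
def accentM4 : String := "\\makebox[0pt][l]{\\raisebox{0.6ex}{\\accentmark{12}{\\char\"1CF9}}}"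

def replace_accents (text : String) : String :=
  if text = "" then text
  else
    let replacements : List (String × String) :=
      [("(1)", accentM1), ("(2)", accentM2), ("(3)", accentM3), ("(4)", accentM4)]
    replacements.foldl (fun t p => PySem.Str.replace t p.1 p.2) text

-- ===== PORT B =====
def accentTable : PySem.Dict (List Char) (List Char) :=
  PySem.Dict.mk
    [("(1)".toList, accentM1.toList), ("(2)".toList, accentM2.toList),
     ("(3)".toList, accentM3.toList), ("(4)".toList, accentM4.toList)]

-- windows shorter than 3 chars can never equal a 3-char key, so the 2nd/3rd arms are exact for them
def scanAcc : List Char → List Char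
  | a :: b :: c :: t =>
    match accentTable.get? [a, b, c] with
    | some r => r ++ scanAcc t
    | none => a :: scanAcc (b :: c :: t)
  | c :: t => c :: scanAcc t
  | [] => []

def replace_accents_alt (text : String) : String :=
  if text = "" then text else String.ofList (scanAcc text.toList)

-- ===== PRECONDITION & SPEC =====
def Spec_replace_accents (text : String) (out : String) : Prop := out = replace_accents_alt text
instance (text : String) (out : String) : Decidable (Spec_replace_accents text out) := by unfold Spec_replace_accents; infer_instance

-- ===== CLAIM =====
def Claim_equal_replace_accents : Prop := ∀ (text : String), Dom_replace_accents text → Spec_replace_accents text (replace_accents text)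

-- ===== LEMMAS AND PROOFS =====

lemma go_nil (old new acc : List Char) (fuel : Nat) :
    PySem.Chars.replace.go old new fuel [] acc = acc.reverse := by
  cases fuel <;> rw [PySem.Chars.replace.go] <;> simp

lemma go_cons (old new : List Char) (fuel : Nat) (c : Char) (t acc : List Char) :
    PySem.Chars.replace.go old new (fuel+1) (c::t) acc =
      if old.isPrefixOf (c::t) then
        PySem.Chars.replace.go old new fuel ((c::t).drop old.length) (new.reverse ++ acc)
      else PySem.Chars.replace.go old new fuel t (c :: acc) := by
  rw [PySem.Chars.replace.go]

lemma go_shift (old new : List Char) (hold : old ≠ []) :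
    ∀ (n : Nat) (l acc : List Char) (fuel : Nat), l.length ≤ n → l.length ≤ fuel →
      PySem.Chars.replace.go old new fuel l acc =
        acc.reverse ++ PySem.Chars.replace.go old new l.length l [] := by
  intro n
  induction n with
  | zero =>
    intro l acc fuel h1 _
    have : l = [] := List.eq_nil_of_length_eq_zero (Nat.le_zero.mp h1)
    subst this
    simp [go_nil]
  | succ n ih =>
    intro l acc fuel h1 h2
    cases l with
    | nil => simp [go_nil]
    | cons c t =>
      cases fuel with
      | zero => simp at h2
      | succ f =>
        have hol : 1 ≤ old.length := by
          cases old with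
          | nil => exact absurd rfl hold
          | cons _ _ => simp
        have hlen : (c::t).length = t.length + 1 := rfl
        rw [go_cons, hlen, go_cons]
        split_ifs with hp
        · have hd : ((c::t).drop old.length).length ≤ n := by
            simp only [List.length_drop, hlen] at *
            omega
          rw [ih ((c::t).drop old.length) (new.reverse ++ acc) f hd
                (by simp only [List.length_drop, hlen] at *; omega),
              ih ((c::t).drop old.length) (new.reverse ++ []) t.length hd
                (by simp only [List.length_drop, hlen] at *; omega)]
          simp
        · rw [ih t (c::acc) f (by simp at h1; omega) (by simp at h2; omega),
              ih t [c] t.length (by simp at h1; omega) (le_refl _)]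
          simp

lemma rep_def (d : Char) (m l : List Char) :
    PySem.Chars.replace l ['(', d, ')'] m =
      PySem.Chars.replace.go ['(', d, ')'] m l.length l [] := by
  rw [PySem.Chars.replace]; rfl

lemma rep_nil (d : Char) (m : List Char) :
    PySem.Chars.replace [] ['(', d, ')'] m = [] := by
  rw [rep_def]; simp [go_nil]

lemma rep_cons_no (d : Char) (m : List Char) (c : Char) (t : List Char)
    (h : ¬ ['(', d, ')'] <+: (c::t)) :
    PySem.Chars.replace (c::t) ['(', d, ')'] m = c :: PySem.Chars.replace t ['(', d, ')'] m := by
  rw [rep_def, rep_def]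
  have hlen : (c::t).length = t.length + 1 := rfl
  rw [hlen, go_cons]
  rw [if_neg (by simpa [List.isPrefixOf_iff_prefix] using h)]
  rw [go_shift _ _ (by simp) t.length t [c] t.length (le_refl _) (le_refl _)]
  simp

lemma rep_cons_match (d : Char) (m : List Char) (t : List Char) :
    PySem.Chars.replace ('('::d::')'::t) ['(', d, ')'] m =
      m ++ PySem.Chars.replace t ['(', d, ')'] m := by
  rw [rep_def, rep_def]
  have hlen : ('('::d::')'::t).length = (t.length + 2) + 1 := by simp
  rw [hlen, go_cons]
  rw [if_pos (by simp)]
  have hdrop : ('('::d::')'::t).drop (['(', d, ')'].length) = t := rfl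
  rw [hdrop, go_shift _ _ (by simp) (t.length + 2) t (m.reverse ++ []) (t.length+2) (by omega) (by omega)]
  simp

lemma rep_cons_ne_paren (d : Char) (m : List Char) (c : Char) (x : List Char) (hc : c ≠ '(') :
    PySem.Chars.replace (c::x) ['(', d, ')'] m = c :: PySem.Chars.replace x ['(', d, ')'] m := by
  apply rep_cons_no
  intro h
  obtain ⟨u, hu⟩ := h
  simp at hu
  exact hc hu.1.symm

lemma rep_short (d : Char) (m l : List Char) (h : l.length ≤ 2) :
    PySem.Chars.replace l ['(', d, ')'] m = l := by
  have hno : ∀ (c : Char) (t : List Char), (c::t).length ≤ 2 → ¬ ['(', d, ')'] <+: (c::t) := by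
    intro c t ht hp
    have := hp.length_le
    simp at this ht
    omega
  match l, h with
  | [], _ => exact rep_nil d m
  | [c], h => rw [rep_cons_no d m c [] (hno c [] (by simp)), rep_nil]
  | [c, c'], h =>
    rw [rep_cons_no d m c [c'] (hno c [c'] (by simp)),
        rep_cons_no d m c' [] (hno c' [] (by simp)), rep_nil]

lemma rep_head (d : Char) (m l : List Char) (hm : m ≠ []) :
    (PySem.Chars.replace l ['(', d, ')'] m).head? = l.head? ∨
    (PySem.Chars.replace l ['(', d, ')'] m).head? = m.head? := by
  cases l with
  | nil => left; rw [rep_nil]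
  | cons c t =>
    by_cases hp : ['(', d, ')'] <+: (c::t)
    · obtain ⟨u, hu⟩ := hp
      simp at hu
      obtain ⟨hc, ht⟩ := hu
      subst hc; subst ht
      right
      rw [rep_cons_match]
      cases m with
      | nil => exact absurd rfl hm
      | cons a s => rfl
    · left; rw [rep_cons_no d m c t hp]; rfl

lemma rep_append_no_paren (d : Char) (m s x : List Char) (h : '(' ∉ s) :
    PySem.Chars.replace (s ++ x) ['(', d, ')'] m = s ++ PySem.Chars.replace x ['(', d, ')'] m := by
  induction s with
  | nil => rfl
  | cons c s' ih =>
    have hc : c ≠ '(' := by intro he; exact h (he ▸ List.mem_cons_self)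
    rw [List.cons_append, rep_cons_ne_paren d m c (s' ++ x) hc,
        ih (fun hz => h (List.mem_cons_of_mem _ hz)), List.cons_append]

def isDig (e : Char) : Prop := e = '1' ∨ e = '2' ∨ e = '3' ∨ e = '4'

def Bad2 (x : List Char) : Prop := ∃ e u, isDig e ∧ x = e :: ')' :: u

lemma not_dig_backslash : ¬ isDig '\\' := by unfold isDig; decide

lemma rep_no_bad (d : Char) (m x : List Char) (hm : m.head? = some '\\') (h : ¬ Bad2 x) :
    ¬ Bad2 (PySem.Chars.replace x ['(', d, ')'] m) := by
  have hmne : m ≠ [] := by intro he; rw [he] at hm; simp at hm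
  cases x with
  | nil => rw [rep_nil]; rintro ⟨e, u, _, he⟩; simp at he
  | cons b y =>
    by_cases hp : ['(', d, ')'] <+: (b::y)
    · obtain ⟨u, hu⟩ := hp
      simp at hu
      obtain ⟨hb, hy⟩ := hu
      subst hb; subst hy
      rw [rep_cons_match]
      rintro ⟨e, u', he, heq⟩
      have : (m ++ PySem.Chars.replace u ['(', d, ')'] m).head? = some e := by rw [heq]; rfl
      rw [List.head?_append_of_ne_nil _ hmne, hm] at this
      have : e = '\\' := by injection this with h'; exact h'.symm
      subst this
      exact not_dig_backslash he
    · rw [rep_cons_no d m b y hp]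
      rintro ⟨e, u', he, heq⟩
      simp at heq
      obtain ⟨hb, hy⟩ := heq
      subst hb
      have hyh : y.head? ≠ some ')' := by
        intro hh
        cases y with
        | nil => simp at hh
        | cons y0 y' =>
          injection hh with hh
          exact h ⟨b, y', he, by rw [hh]⟩
      have : (PySem.Chars.replace y ['(', d, ')'] m).head? = some ')' := by rw [hy]; rfl
      rcases rep_head d m y hmne with hc | hc
      · exact hyh (hc ▸ this)
      · rw [hc, hm] at this; injection this with this; exact absurd this.symm (by decide)

lemma rep_paren_no_bad (d : Char) (m x : List Char) (hd : isDig d) (h : ¬ Bad2 x) :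
    PySem.Chars.replace ('('::x) ['(', d, ')'] m = '(' :: PySem.Chars.replace x ['(', d, ')'] m := by
  apply rep_cons_no
  intro hp
  obtain ⟨u, hu⟩ := hp
  simp at hu
  exact h ⟨d, u, hd, hu.symm⟩

lemma rep_step3 (d : Char) (m : List Char) (e : Char) (u : List Char)
    (hed : e ≠ d) (hep : e ≠ '(') :
    PySem.Chars.replace ('('::e::')'::u) ['(', d, ')'] m =
      '('::e::')':: PySem.Chars.replace u ['(', d, ')'] m := by
  rw [rep_cons_no d m '(' (e::')'::u) (by rintro ⟨w, hw⟩; simp at hw; exact hed hw.1.symm),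
      rep_cons_ne_paren d m e (')'::u) hep,
      rep_cons_ne_paren d m ')' u (by decide)]

lemma tbl_none (a b c : Char) (h : a ≠ '(' ∨ ¬ isDig b ∨ c ≠ ')') :
    accentTable.get? [a, b, c] = none := by
  have hne : ∀ e : Char, isDig e → ¬ (['(', e, ')'] = [a, b, c]) := by
    intro e he heq
    simp only [List.cons.injEq] at heq
    rcases h with h | h | h
    · exact h heq.1.symm
    · exact h (heq.2.1 ▸ he)
    · exact h heq.2.2.1.symm
  rw [accentTable, PySem.Dict.get?_mk_cons, PySem.Dict.get?_mk_cons,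
      PySem.Dict.get?_mk_cons, PySem.Dict.get?_mk_cons]
  rw [if_neg (by simpa using hne '1' (by unfold isDig; decide)),
      if_neg (by simpa using hne '2' (by unfold isDig; decide)),
      if_neg (by simpa using hne '3' (by unfold isDig; decide)),
      if_neg (by simpa using hne '4' (by unfold isDig; decide))]
  rfl

lemma scan_win (a b c : Char) (t : List Char) :
    scanAcc (a::b::c::t) =
      match accentTable.get? [a, b, c] with
      | some r => r ++ scanAcc t
      | none => a :: scanAcc (b::c::t) := by
  rw [scanAcc]

lemma scan_short (l : List Char) (h : l.length ≤ 2) : scanAcc l = l := by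
  match l, h with
  | [], _ => rfl
  | [c], _ => rfl
  | [b, c], _ => rfl

def passAll (l : List Char) : List Char :=
  PySem.Chars.replace
    (PySem.Chars.replace
      (PySem.Chars.replace
        (PySem.Chars.replace l ['(', '1', ')'] accentM1.toList)
        ['(', '2', ')'] accentM2.toList)
      ['(', '3', ')'] accentM3.toList)
    ['(', '4', ')'] accentM4.toList

lemma bad2_iff (b c : Char) (t : List Char) : Bad2 (b::c::t) ↔ (isDig b ∧ c = ')') := by
  constructor
  · rintro ⟨e, u, he, heq⟩
    simp only [List.cons.injEq] at heq
    exact ⟨heq.1 ▸ he, heq.2.1⟩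
  · rintro ⟨hb, rfl⟩
    exact ⟨b, t, hb, rfl⟩

lemma passAll_short (l : List Char) (h : l.length ≤ 2) : passAll l = l := by
  unfold passAll
  rw [rep_short _ _ _ h, rep_short _ _ _ h, rep_short _ _ _ h, rep_short _ _ _ h]

lemma passAll_cons_of_ne (a : Char) (x : List Char) (ha : a ≠ '(') :
    passAll (a::x) = a :: passAll x := by
  unfold passAll
  rw [rep_cons_ne_paren _ _ _ _ ha, rep_cons_ne_paren _ _ _ _ ha,
      rep_cons_ne_paren _ _ _ _ ha, rep_cons_ne_paren _ _ _ _ ha]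

lemma passAll_paren_no_bad (x : List Char) (h : ¬ Bad2 x) :
    passAll ('('::x) = '(' :: passAll x := by
  unfold passAll
  have h1 := rep_no_bad '1' accentM1.toList x rfl h
  have h2 := rep_no_bad '2' accentM2.toList _ rfl h1
  have h3 := rep_no_bad '3' accentM3.toList _ rfl h2
  rw [rep_paren_no_bad '1' _ _ (by unfold isDig; decide) h,
      rep_paren_no_bad '2' _ _ (by unfold isDig; decide) h1,
      rep_paren_no_bad '3' _ _ (by unfold isDig; decide) h2,
      rep_paren_no_bad '4' _ _ (by unfold isDig; decide) h3]

lemma passAll_match1 (t : List Char) :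
    passAll ('('::'1'::')'::t) = accentM1.toList ++ passAll t := by
  unfold passAll
  rw [rep_cons_match '1', rep_append_no_paren '2' _ _ _ (by decide),
      rep_append_no_paren '3' _ _ _ (by decide), rep_append_no_paren '4' _ _ _ (by decide)]

lemma passAll_match2 (t : List Char) :
    passAll ('('::'2'::')'::t) = accentM2.toList ++ passAll t := by
  unfold passAll
  rw [rep_step3 '1' _ '2' _ (by decide) (by decide), rep_cons_match '2',
      rep_append_no_paren '3' _ _ _ (by decide), rep_append_no_paren '4' _ _ _ (by decide)]

lemma passAll_match3 (t : List Char) :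
    passAll ('('::'3'::')'::t) = accentM3.toList ++ passAll t := by
  unfold passAll
  rw [rep_step3 '1' _ '3' _ (by decide) (by decide), rep_step3 '2' _ '3' _ (by decide) (by decide),
      rep_cons_match '3', rep_append_no_paren '4' _ _ _ (by decide)]

lemma passAll_match4 (t : List Char) :
    passAll ('('::'4'::')'::t) = accentM4.toList ++ passAll t := by
  unfold passAll
  rw [rep_step3 '1' _ '4' _ (by decide) (by decide), rep_step3 '2' _ '4' _ (by decide) (by decide),
      rep_step3 '3' _ '4' _ (by decide) (by decide), rep_cons_match '4']

lemma passAll_eq_scan : ∀ (n : Nat) (l : List Char), l.length ≤ n → passAll l = scanAcc l := by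
  intro n
  induction n with
  | zero =>
    intro l h
    have : l = [] := List.eq_nil_of_length_eq_zero (Nat.le_zero.mp h)
    subst this
    exact passAll_short [] (by simp)
  | succ n ih =>
    intro l hl
    match l with
    | [] => exact passAll_short [] (by simp)
    | [c] => rw [passAll_short [c] (by simp), scan_short [c] (by simp)]
    | [b, c] => rw [passAll_short [b, c] (by simp), scan_short [b, c] (by simp)]
    | a :: b :: c :: t =>
      have ht : t.length ≤ n := by simp at hl; omega
      have hx : (b::c::t).length ≤ n := by simp at hl ⊢; omega
      by_cases hw : a = '(' ∧ isDig b ∧ c = ')'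
      · obtain ⟨rfl, hb, rfl⟩ := hw
        rw [scan_win]
        rcases hb with rfl | rfl | rfl | rfl
        · rw [passAll_match1, ih t ht]; rfl
        · rw [passAll_match2, ih t ht]; rfl
        · rw [passAll_match3, ih t ht]; rfl
        · rw [passAll_match4, ih t ht]; rfl
      · have h' : a ≠ '(' ∨ ¬ isDig b ∨ c ≠ ')' := by tauto
        rw [scan_win, tbl_none a b c h']
        by_cases ha : a = '('
        · subst ha
          have hnb : ¬ Bad2 (b::c::t) := by rw [bad2_iff]; tauto
          rw [passAll_paren_no_bad _ hnb, ih _ hx]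
        · rw [passAll_cons_of_ne a _ ha, ih _ hx]

-- ===== VERDICT =====
theorem replace_accents_spec : Claim_equal_replace_accents := by
  intro text _
  unfold Spec_replace_accents replace_accents replace_accents_alt
  by_cases h : text = ""
  · rw [if_pos h, if_pos h]
  · rw [if_neg h, if_neg h]
    simp only [List.foldl]
    rw [PySem.Str.replace]
    apply congrArg
    rw [PySem.Str.toList_replace, PySem.Str.toList_replace, PySem.Str.toList_replace]
    have e1 : "(1)".toList = ['(', '1', ')'] := by decide
    have e2 : "(2)".toList = ['(', '2', ')'] := by decide
    have e3 : "(3)".toList = ['(', '3', ')'] := by decide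
    have e4 : "(4)".toList = ['(', '4', ')'] := by decide
    rw [e1, e2, e3, e4]
    exact passAll_eq_scan text.toList.length text.toList (le_refl _)
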